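-- pv_equiv track=rewrite | github.com/nilblom/nilblom.github.io | crackthecode/crackthecode.py | mirror_numbers
-- ===== SOURCE A (Python) =====
-- import copy
--
-- def mirror_numbers(a):
-- 	numbers = []
-- 	b = copy.copy(a)
-- 	for i in range(3):
-- 		if a[i] != "_":
-- 			numbers.append(a[i])
-- 	for i in range(3):
-- 		if a[i] != "_":
-- 			b[i] = numbers.pop(-1)
-- 		else:
-- 			b[i] = "_"
-- 	if b == a:
-- 		return None
-- 	return b
-- ===== SOURCE B (Python) =====
-- import copy
--
-- def mirror_numbers(a):
-- 	b = copy.copy(a)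
-- 	i, j = 0, 2
-- 	while i < j:
-- 		if a[i] == "_":
-- 			i += 1
-- 		elif a[j] == "_":
-- 			j -= 1
-- 		else:
-- 			b[i], b[j] = b[j], b[i]
-- 			i += 1
-- 			j -= 1
-- 	if b == a:
-- 		return None
-- 	return b
-- ===== Notes on version B (the rewrite author's own statement) =====
-- stated objective: simpler
-- what changed: Replaces A's two passes (collect non-underscore values into a list, then overwrite by popping from its back) with a single converging two-pointer sweep that skips underscores and swaps the non-underscore entries in place.
import Mathlib
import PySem

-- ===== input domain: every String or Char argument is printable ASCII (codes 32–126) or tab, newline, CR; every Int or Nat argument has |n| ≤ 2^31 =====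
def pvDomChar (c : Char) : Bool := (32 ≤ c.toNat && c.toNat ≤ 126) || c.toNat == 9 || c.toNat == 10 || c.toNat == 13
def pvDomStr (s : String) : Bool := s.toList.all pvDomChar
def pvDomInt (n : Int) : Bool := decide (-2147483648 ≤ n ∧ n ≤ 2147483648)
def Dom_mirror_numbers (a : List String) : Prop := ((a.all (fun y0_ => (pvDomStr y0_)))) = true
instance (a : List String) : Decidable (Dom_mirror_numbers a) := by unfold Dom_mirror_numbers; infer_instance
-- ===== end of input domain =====

-- ===== PORT A =====
-- B mutates no argument; both Pythons copy `a` first. Header: B swaps via two converging pointers instead of a collect-then-pop double pass; objective: simpler.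
-- first loop of A: collect a[i] for i in range(3) with a[i] != "_"  (a.getD i "" is only out of range outside Pre_)
def mirrorCollect (a : List String) : List String :=
  [0, 1, 2].foldl (fun numbers i =>
    if a.getD i "" ≠ "_" then numbers ++ [a.getD i ""] else numbers) []

-- second loop of A: b[i] = numbers.pop(-1) or "_"
def mirrorWrite (a : List String) : List String × List String :=
  [0, 1, 2].foldl (fun (st : List String × List String) i =>
    if a.getD i "" ≠ "_" then
      ((st.1).set i ((st.2).getLastD ""), (st.2).dropLast)
    else
      ((st.1).set i "_", st.2)) (a, mirrorCollect a)

def mirror_numbers (a : List String) : Option (List String) :=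
  let b := (mirrorWrite a).1
  if b = a then none else some b

-- ===== PORT B =====
-- two-pointer sweep of Source B: skip underscores from both ends, swap, converge
def mirrorTwoPtr (a b : List String) (i j : Nat) : List String :=
  if _h : i < j then
    if a.getD i "" = "_" then mirrorTwoPtr a b (i + 1) j
    else if a.getD j "" = "_" then mirrorTwoPtr a b i (j - 1)
    else mirrorTwoPtr a ((b.set i (b.getD j "")).set j (b.getD i "")) (i + 1) (j - 1)
  else b
termination_by j - i
decreasing_by all_goals omega

def mirror_numbers_alt (a : List String) : Option (List String) :=
  let b := mirrorTwoPtr a a 0 2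
  if b = a then none else some b

-- ===== PRECONDITION & SPEC =====
-- Pre_ excludes lists with fewer than 3 elements: A raises IndexError there (a[i] for i in range(3)).
def Pre_mirror_numbers (a : List String) : Prop := 3 ≤ a.length
instance (a : List String) : Decidable (Pre_mirror_numbers a) := by unfold Pre_mirror_numbers; infer_instance
def pvWitness_mirror_numbers : List String := ["1", "_", "2"]
def Spec_mirror_numbers (a : List String) (out : Option (List String)) : Prop := out = mirror_numbers_alt a
instance (a : List String) (out : Option (List String)) : Decidable (Spec_mirror_numbers a out) := by unfold Spec_mirror_numbers; infer_instance

-- ===== CLAIM (what is proved, stated in full; the proofs are below) =====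
def Claim_equal_mirror_numbers : Prop := ∀ (a : List String), Dom_mirror_numbers a → Pre_mirror_numbers a → Spec_mirror_numbers a (mirror_numbers a)

-- ===== LEMMAS AND PROOFS =====
-- core: on a list of length ≥ 3 the two sides build the same b
theorem mirror_b_eq (x y z : String) (rest : List String) :
    (mirrorWrite (x :: y :: z :: rest)).1 = mirrorTwoPtr (x :: y :: z :: rest) (x :: y :: z :: rest) 0 2 := by
  by_cases hx : x = "_" <;> by_cases hy : y = "_" <;> by_cases hz : z = "_" <;>
    simp [mirrorWrite, mirrorCollect, mirrorTwoPtr, hx, hy, hz, List.getD, List.set]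

-- ===== VERDICT (by name: the statement is the Claim_ definition above) =====
theorem mirror_numbers_spec : Claim_equal_mirror_numbers := by
  intro a _ hpre
  unfold Spec_mirror_numbers mirror_numbers mirror_numbers_alt
  match a, hpre with
  | x :: y :: z :: rest, _ => rw [mirror_b_eq]
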